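-- pv_equiv track=rewrite | github.com/Nghia03092004/nghia03092004.github.io | project_euler_unified/problem_530/solution.py | dirichlet_divisor_sum
-- ===== SOURCE A (Python) =====
-- import math
--
-- def dirichlet_divisor_sum(x):
--     """D(x) = sum_{j=1}^{x} floor(x/j) using hyperbola method."""
--     if x <= 0:
--         return 0
--     sq = int(math.isqrt(x))
--     result = 0
--     for j in range(1, sq + 1):
--         result += x // j
--     return 2 * result - sq * sq
-- ===== SOURCE B (Python) =====
-- def dirichlet_divisor_sum(x):
--     """D(x) = sum_{j=1}^{x} floor(x/j) by grouping j with equal quotient x//j."""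
--     total = 0
--     j = 1
--     while j <= x:
--         v = x // j
--         j2 = x // v          # last j' with x // j' == v
--         total += v * (j2 - j + 1)
--         j = j2 + 1
--     return total
-- ===== Notes on version B (the rewrite author's own statement) =====
-- stated objective: alternative
-- what changed: Replaces the hyperbola method (isqrt truncation, doubling the partial sum and subtracting sq*sq) with a while loop over blocks of equal quotient: for each block it finds the last index j2 with the same quotient v = x//j and adds v*(j2-j+1); no isqrt and no correction term.
import Mathlib
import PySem

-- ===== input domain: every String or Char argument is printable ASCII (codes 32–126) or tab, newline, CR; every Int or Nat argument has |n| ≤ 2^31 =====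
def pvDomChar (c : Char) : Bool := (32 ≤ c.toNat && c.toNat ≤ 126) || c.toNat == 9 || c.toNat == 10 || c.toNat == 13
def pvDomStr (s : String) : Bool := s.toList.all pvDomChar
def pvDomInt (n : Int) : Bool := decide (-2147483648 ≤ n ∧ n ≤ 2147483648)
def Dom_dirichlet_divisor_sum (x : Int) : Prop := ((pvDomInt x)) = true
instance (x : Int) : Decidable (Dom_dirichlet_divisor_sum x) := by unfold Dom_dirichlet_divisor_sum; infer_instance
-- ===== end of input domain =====

-- B replaces A's hyperbola method (isqrt loop, doubling and sq*sq correction) by a while loop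
-- over blocks of equal quotient x//j: a genuinely different O(√x) algorithm, not claimed faster.

-- ===== PORT A =====
-- A: if x <= 0: return 0; sq = isqrt(x); result = sum of x//j for j in 1..sq; return 2*result - sq*sq.
-- math.isqrt(x) for 0 ≤ x is exactly Nat.sqrt x.toNat (floor square root of a nonnegative int).
def dirichlet_divisor_sum (x : Int) : Int :=
  if x ≤ 0 then 0
  else
    let sq : Int := (Nat.sqrt x.toNat : Int)
    let result : Int :=
      (PySem.List.pyRange 1 (sq + 1) 1).foldl (fun acc j => acc + PySem.Int.floordiv x j) 0
    2 * result - sq * sq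

-- ===== PORT B =====
-- B's while loop, totalised with fuel (x.toNat + 1 bounds the number of iterations:
-- j strictly increases each pass and stops once j > x).
def pvAltLoop (x : Int) : Nat → Int → Int → Int
  | 0, _, total => total
  | fuel + 1, j, total =>
    if j ≤ x then
      let v := PySem.Int.floordiv x j
      let j2 := PySem.Int.floordiv x v
      pvAltLoop x fuel (j2 + 1) (total + v * (j2 - j + 1))
    else total

def dirichlet_divisor_sum_alt (x : Int) : Int :=
  pvAltLoop x (x.toNat + 1) 1 0

-- ===== PRECONDITION & SPEC =====
def Spec_dirichlet_divisor_sum (x : Int) (out : Int) : Prop := out = dirichlet_divisor_sum_alt x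
instance (x : Int) (out : Int) : Decidable (Spec_dirichlet_divisor_sum x out) := by unfold Spec_dirichlet_divisor_sum; infer_instance

-- ===== CLAIM (what is proved, stated in full; the proofs are below) =====
def Claim_equal_dirichlet_divisor_sum : Prop := ∀ (x : Int), Dom_dirichlet_divisor_sum x → Spec_dirichlet_divisor_sum x (dirichlet_divisor_sum x)

-- ===== LEMMAS AND PROOFS =====

-- Counting the fiber {b : a*b ≤ n}: ∑_{b=1}^{n} [a*b ≤ n] = n / a.
theorem pv_fiber (n a : ℕ) (ha : 1 ≤ a) :
    (∑ b ∈ Finset.Icc 1 n, if a * b ≤ n then (1:ℤ) else 0) = ((n / a : ℕ) : ℤ) := by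
  rw [Finset.sum_boole]
  have : (Finset.Icc 1 n).filter (fun b => a * b ≤ n) = Finset.Icc 1 (n / a) := by
    ext b
    simp only [Finset.mem_filter, Finset.mem_Icc]
    constructor
    · rintro ⟨⟨h1, _⟩, h3⟩
      exact ⟨h1, (Nat.le_div_iff_mul_le ha).2 (by rw [mul_comm]; exact h3)⟩
    · rintro ⟨h1, h2⟩
      have h3 : b * a ≤ n := (Nat.le_div_iff_mul_le ha).1 h2
      have h4 : b ≤ n := le_trans h2 (Nat.div_le_self n a)
      exact ⟨⟨h1, h4⟩, by rw [mul_comm]; exact h3⟩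
  rw [this, Nat.card_Icc]
  norm_num

-- The hyperbola identity: 2·∑_{a=1}^{√n} n/a − √n·√n = ∑_{a=1}^{n} n/a.
theorem pv_hyperbola (n : ℕ) :
    2 * (∑ a ∈ Finset.Icc 1 (Nat.sqrt n), ((n / a : ℕ) : ℤ)) - (Nat.sqrt n : ℤ) * (Nat.sqrt n : ℤ)
      = ∑ a ∈ Finset.Icc 1 n, ((n / a : ℕ) : ℤ) := by
  set s := Nat.sqrt n with hs
  have hsn : s ≤ n := Nat.sqrt_le_self n
  have hs1 : s * s ≤ n := Nat.sqrt_le n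
  have hs2 : n < (s + 1) * (s + 1) := Nat.lt_succ_sqrt n
  have hrestrict : ∀ f : ℕ → ℤ, (∑ a ∈ Finset.Icc 1 n, if a ≤ s then f a else 0)
      = ∑ a ∈ Finset.Icc 1 s, f a := by
    intro f
    rw [← Finset.sum_filter]
    congr 1
    ext a
    simp only [Finset.mem_filter, Finset.mem_Icc]
    omega
  have hR : (∑ a ∈ Finset.Icc 1 n, ((n / a : ℕ) : ℤ))
      = ∑ a ∈ Finset.Icc 1 n, ∑ b ∈ Finset.Icc 1 n, if a * b ≤ n then (1:ℤ) else 0 := by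
    refine Finset.sum_congr rfl ?_
    intro a ha
    simp only [Finset.mem_Icc] at ha
    rw [pv_fiber n a ha.1]
  have hpt : ∀ a ∈ Finset.Icc 1 n, ∀ b ∈ Finset.Icc 1 n,
      (if a * b ≤ n then (1:ℤ) else 0)
        = ((if a ≤ s then (if a * b ≤ n then (1:ℤ) else 0) else 0)
          + (if b ≤ s then (if a * b ≤ n then (1:ℤ) else 0) else 0))
          - (if a ≤ s then (if b ≤ s then (1:ℤ) else 0) else 0) := by
    intro a ha b hb
    by_cases ha' : a ≤ s <;> by_cases hb' : b ≤ s
    · have := le_trans (Nat.mul_le_mul ha' hb') hs1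
      simp [ha', hb', this]
    · simp [ha', hb']
    · simp [ha', hb']
    · have : ¬ a * b ≤ n := by
        intro h3
        have : (s+1) * (s+1) ≤ a * b := Nat.mul_le_mul (by omega) (by omega)
        omega
      simp [ha', hb', this]
  have hT1 : (∑ a ∈ Finset.Icc 1 n, ∑ b ∈ Finset.Icc 1 n,
        if a ≤ s then (if a * b ≤ n then (1:ℤ) else 0) else 0)
      = ∑ a ∈ Finset.Icc 1 s, ((n / a : ℕ) : ℤ) := by
    have step : ∀ a, (∑ b ∈ Finset.Icc 1 n, if a ≤ s then (if a * b ≤ n then (1:ℤ) else 0) else 0)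
        = (if a ≤ s then (∑ b ∈ Finset.Icc 1 n, if a * b ≤ n then (1:ℤ) else 0) else 0) := by
      intro a; split_ifs <;> simp
    rw [Finset.sum_congr rfl fun a _ => step a, hrestrict]
    refine Finset.sum_congr rfl ?_
    intro a ha
    simp only [Finset.mem_Icc] at ha
    exact pv_fiber n a ha.1
  have hT2 : (∑ a ∈ Finset.Icc 1 n, ∑ b ∈ Finset.Icc 1 n,
        if b ≤ s then (if a * b ≤ n then (1:ℤ) else 0) else 0)
      = ∑ a ∈ Finset.Icc 1 s, ((n / a : ℕ) : ℤ) := by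
    rw [Finset.sum_comm]
    have step : ∀ b, (∑ a ∈ Finset.Icc 1 n, if b ≤ s then (if a * b ≤ n then (1:ℤ) else 0) else 0)
        = (if b ≤ s then (∑ a ∈ Finset.Icc 1 n, if b * a ≤ n then (1:ℤ) else 0) else 0) := by
      intro b
      split_ifs with h
      · exact Finset.sum_congr rfl fun a _ => by rw [mul_comm]
      · simp
    rw [Finset.sum_congr rfl fun b _ => step b, hrestrict]
    refine Finset.sum_congr rfl ?_
    intro b hb
    simp only [Finset.mem_Icc] at hb
    exact pv_fiber n b hb.1
  have hT3 : (∑ a ∈ Finset.Icc 1 n, ∑ b ∈ Finset.Icc 1 n,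
        if a ≤ s then (if b ≤ s then (1:ℤ) else 0) else 0)
      = (s : ℤ) * (s : ℤ) := by
    have inner : (∑ b ∈ Finset.Icc 1 n, if b ≤ s then (1:ℤ) else 0) = (s : ℤ) := by
      rw [hrestrict (fun _ => (1:ℤ))]
      simp [Nat.card_Icc]
    have step : ∀ a, (∑ b ∈ Finset.Icc 1 n, if a ≤ s then (if b ≤ s then (1:ℤ) else 0) else 0)
        = (if a ≤ s then (s:ℤ) else 0) := by
      intro a; split_ifs <;> simp [inner]
    rw [Finset.sum_congr rfl fun a _ => step a, hrestrict (fun _ => (s:ℤ))]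
    simp [Nat.card_Icc]
  rw [hR, Finset.sum_congr rfl (fun a ha => Finset.sum_congr rfl (fun b hb => hpt a ha b hb))]
  simp only [Finset.sum_sub_distrib, Finset.sum_add_distrib]
  rw [hT1, hT2, hT3]
  ring

-- The list-level sum of x//j over range(1, m+1) is the Finset sum ∑_{a=1}^{m} n/a (x = n ≥ 0).
theorem pv_sum_pyRange (n m : ℕ) :
    ((PySem.List.pyRange 1 ((m : ℤ) + 1) 1).map (fun j => PySem.Int.floordiv (n : ℤ) j)).sum
      = ∑ a ∈ Finset.Icc 1 m, ((n / a : ℕ) : ℤ) := by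
  induction m with
  | zero => simp [PySem.List.pyRange_one_eq_nil]
  | succ m ih =>
    have h1 : (1 : ℤ) ≤ (m : ℤ) + 1 := by omega
    have hc : ((m + 1 : ℕ) : ℤ) + 1 = ((m : ℤ) + 1) + 1 := by push_cast; ring
    rw [hc, PySem.List.pyRange_one_succ_right h1, List.map_append, List.sum_append, ih]
    rw [Finset.sum_Icc_succ_top (by omega : 1 ≤ m + 1)]
    simp

-- Splitting an Icc sum at an interior point.
theorem pv_split_sum (a b c : ℕ) (h1 : a ≤ b) (h2 : b ≤ c) (f : ℕ → ℤ) :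
    ∑ k ∈ Finset.Icc a c, f k = (∑ k ∈ Finset.Icc a b, f k) + ∑ k ∈ Finset.Icc (b+1) c, f k := by
  rw [Finset.Icc_add_one_left_eq_Ioc, ← Finset.sum_union ?hd]
  · congr 1
    ext k
    simp only [Finset.mem_union, Finset.mem_Icc, Finset.mem_Ioc]
    omega
  case hd =>
    simp only [Finset.disjoint_left, Finset.mem_Icc, Finset.mem_Ioc]
    omega

-- B's block loop computes the remaining tail sum ∑_{k=j}^{n} n/k (given enough fuel).
theorem pv_altLoop_eq (n : ℕ) :
    ∀ (fuel j : ℕ) (total : ℤ), 1 ≤ j → n + 1 - j ≤ fuel →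
      pvAltLoop (n : ℤ) fuel (j : ℤ) total = total + ∑ k ∈ Finset.Icc j n, ((n / k : ℕ) : ℤ) := by
  intro fuel
  induction fuel with
  | zero =>
    intro j total hj hf
    have hjn : n < j := by omega
    rw [Finset.Icc_eq_empty (by omega)]
    simp [pvAltLoop]
  | succ fuel ih =>
    intro j total hj hf
    by_cases hjn : j ≤ n
    · have hjx : (j : ℤ) ≤ (n : ℤ) := by exact_mod_cast hjn
      have hV1 : 1 ≤ n / j := (Nat.one_le_div_iff (by omega)).2 hjn
      have hjJ2 : j ≤ n / (n / j) := by
        have := Nat.div_mul_le_self n j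
        exact (Nat.le_div_iff_mul_le hV1).2 (by rw [mul_comm]; omega)
      have hJ2n : n / (n / j) ≤ n := Nat.div_le_self n (n / j)
      have hconst : ∀ k ∈ Finset.Icc j (n / (n / j)), ((n / k : ℕ) : ℤ) = ((n / j : ℕ) : ℤ) := by
        intro k hk
        simp only [Finset.mem_Icc] at hk
        have hle : n / k ≤ n / j := Nat.div_le_div_left hk.1 (by omega)
        have h3 : k * (n / j) ≤ n := (Nat.le_div_iff_mul_le hV1).1 hk.2
        have hge : n / j ≤ n / k := (Nat.le_div_iff_mul_le (by omega)).2 (by rw [mul_comm]; exact h3)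
        have : n / k = n / j := by omega
        rw [this]
      rw [show pvAltLoop (n : ℤ) (fuel + 1) (j : ℤ) total
            = (if (j : ℤ) ≤ (n : ℤ) then
                pvAltLoop (n : ℤ) fuel (PySem.Int.floordiv (n : ℤ) (PySem.Int.floordiv (n : ℤ) (j : ℤ)) + 1)
                  (total + PySem.Int.floordiv (n : ℤ) (j : ℤ)
                    * (PySem.Int.floordiv (n : ℤ) (PySem.Int.floordiv (n : ℤ) (j : ℤ)) - (j : ℤ) + 1))
              else total) from rfl,
          if_pos hjx, PySem.Int.floordiv_natCast, PySem.Int.floordiv_natCast]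
      rw [show ((n / (n / j) : ℕ) : ℤ) + 1 = ((n / (n / j) + 1 : ℕ) : ℤ) by push_cast; ring]
      rw [ih (n / (n / j) + 1) _ (by omega) (by omega)]
      rw [pv_split_sum j (n / (n / j)) n hjJ2 hJ2n, Finset.sum_congr rfl hconst,
          Finset.sum_const, Nat.card_Icc, nsmul_eq_mul]
      have hcast : ((n / (n / j) + 1 - j : ℕ) : ℤ) = ((n / (n / j) : ℕ) : ℤ) - (j : ℤ) + 1 := by omega
      rw [hcast]
      ring
    · have hjx : ¬ (j : ℤ) ≤ (n : ℤ) := by exact_mod_cast hjn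
      rw [Finset.Icc_eq_empty (by omega)]
      simp [pvAltLoop, hjx]

-- ===== VERDICT (by name: the statement is the Claim_ definition above) =====
theorem dirichlet_divisor_sum_spec : Claim_equal_dirichlet_divisor_sum := by
  intro x _
  unfold Spec_dirichlet_divisor_sum dirichlet_divisor_sum dirichlet_divisor_sum_alt
  by_cases hx : x ≤ 0
  · rw [if_pos hx]
    have h0 : x.toNat = 0 := Int.toNat_of_nonpos hx
    have h1 : ¬ (1 : ℤ) ≤ x := by omega
    rw [h0]
    simp [pvAltLoop, h1]
  · rw [if_neg hx]
    have hx0 : 0 ≤ x := by omega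
    obtain ⟨n, rfl⟩ : ∃ n : ℕ, x = (n : ℤ) := ⟨x.toNat, (Int.toNat_of_nonneg hx0).symm⟩
    have hn : 1 ≤ n := by omega
    simp only [Int.toNat_natCast]
    rw [PySem.List.foldl_add (g := fun j => PySem.Int.floordiv (n : ℤ) j)]
    rw [pv_sum_pyRange n (Nat.sqrt n), zero_add]
    have hB := pv_altLoop_eq n (n + 1) 1 0 le_rfl (by omega)
    rw [Nat.cast_one] at hB
    rw [hB, zero_add]
    exact pv_hyperbola n
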